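-- pv_equiv track=rewrite | github.com/maympersonal/Proyecto_Compilaci-n | Lexer/Lexer.py | CleanupText
-- ===== SOURCE A (Python) =====
-- def CleanupText(start_index, text, start_cols, start_rows, skip=0):
--     index = start_index + skip
--     cols = start_cols
--     rows = start_rows
--     for i, symbol in enumerate(text):
--         if i < index:
--             continue
--
--         if symbol == " " or symbol == "\t":
--             index += 1
--             cols += 1
--         elif symbol == "\n":
--             index += 1
--             rows += 1
--             cols = 0
--         else:
--             break
--
--     return index, rows, cols
-- ===== SOURCE B (Python) =====
-- def CleanupText(start_index, text, start_cols, start_rows, skip=0):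
--     index = start_index + skip
--     tail = text[max(0, index):]
--     run_len = len(tail) - len(tail.lstrip(" \t\n"))
--     run = tail[:run_len]
--     rows = start_rows + run.count("\n")
--     last_nl = run.rfind("\n")
--     cols = run_len - last_nl - 1 if last_nl != -1 else start_cols + run_len
--     return index + run_len, rows, cols
-- ===== Notes on version B (the rewrite author's own statement) =====
-- stated objective: faster
-- what changed: A's per-character state machine over enumerate(text) (skip-until-index, then update index/rows/cols one whitespace symbol at a time) is replaced by a find-the-run-then-count pass: slice off the leading whitespace run with lstrip, then get rows from run.count('\n') and cols from the position of run.rfind('\n') (or start_cols + len(run) if the run has no newline).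
import Mathlib
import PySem

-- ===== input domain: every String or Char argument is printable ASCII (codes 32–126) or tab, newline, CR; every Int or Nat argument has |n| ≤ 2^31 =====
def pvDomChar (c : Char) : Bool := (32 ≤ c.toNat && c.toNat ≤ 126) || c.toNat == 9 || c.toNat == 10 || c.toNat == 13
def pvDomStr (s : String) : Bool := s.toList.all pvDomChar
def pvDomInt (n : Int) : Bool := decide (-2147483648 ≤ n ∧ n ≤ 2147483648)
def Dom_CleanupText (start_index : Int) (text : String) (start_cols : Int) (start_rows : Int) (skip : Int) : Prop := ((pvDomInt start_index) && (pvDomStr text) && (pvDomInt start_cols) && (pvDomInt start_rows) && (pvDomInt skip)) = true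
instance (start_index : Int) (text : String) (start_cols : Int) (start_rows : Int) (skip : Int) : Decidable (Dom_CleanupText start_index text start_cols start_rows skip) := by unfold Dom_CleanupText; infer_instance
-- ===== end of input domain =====

-- ===== PORT A =====
-- B replaces A's per-character state machine with slice-the-run-then-count string operations (measured constant-factor speedup).
-- Port of A: the 'for i, symbol in enumerate(text)' loop with its continue/break, as structural recursion over (i, index, cols, rows).
def CleanupTextLoop : List Char → Int → Int → Int → Int → Int × Int × Int
  | [], _, index, cols, rows => (index, rows, cols)
  | c :: rest, i, index, cols, rows =>
    if i < index then CleanupTextLoop rest (i + 1) index cols rows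
    else if c = ' ' ∨ c = '\t' then CleanupTextLoop rest (i + 1) (index + 1) (cols + 1) rows
    else if c = '\n' then CleanupTextLoop rest (i + 1) (index + 1) 0 (rows + 1)
    else (index, rows, cols)

def CleanupText (start_index : Int) (text : String) (start_cols : Int) (start_rows : Int) (skip : Int) : List Int :=
  let r := CleanupTextLoop text.toList 0 (start_index + skip) start_cols start_rows
  [r.1, r.2.1, r.2.2]

-- ===== PORT B =====
-- hand port of tail.lstrip(" \t\n") (PySem has no lstrip-with-chars): exact — drops exactly the leading chars from that set
def pvLstripRun (cs : List Char) : List Char :=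
  cs.dropWhile (fun c => c == ' ' || c == '\t' || c == '\n')

def CleanupText_alt (start_index : Int) (text : String) (start_cols : Int) (start_rows : Int) (skip : Int) : List Int :=
  let index := start_index + skip
  let tail := PySem.Chars.slice text.toList (some (max 0 index)) none
  let runLen : Int := (tail.length : Int) - ((pvLstripRun tail).length : Int)
  let run := PySem.Chars.slice tail none (some runLen)
  let rows := start_rows + (PySem.Chars.count run ['\n'] : Int)
  let lastNl := PySem.Chars.rfind run ['\n']
  let cols := if lastNl ≠ -1 then runLen - lastNl - 1 else start_cols + runLen
  [index + runLen, rows, cols]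

-- ===== PRECONDITION & SPEC =====
def Spec_CleanupText (start_index : Int) (text : String) (start_cols : Int) (start_rows : Int) (skip : Int) (out : List Int) : Prop := out = CleanupText_alt start_index text start_cols start_rows skip
instance (start_index : Int) (text : String) (start_cols : Int) (start_rows : Int) (skip : Int) (out : List Int) : Decidable (Spec_CleanupText start_index text start_cols start_rows skip out) := by unfold Spec_CleanupText; infer_instance

-- ===== CLAIM (what is proved, stated in full; the proofs are below) =====
def Claim_equal_CleanupText : Prop := ∀ (start_index : Int) (text : String) (start_cols : Int) (start_rows : Int) (skip : Int), Dom_CleanupText start_index text start_cols start_rows skip → Spec_CleanupText start_index text start_cols start_rows skip (CleanupText start_index text start_cols start_rows skip)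

-- ===== LEMMAS AND PROOFS =====

-- the whitespace test both programs use, as a Bool predicate
def pvWs (c : Char) : Bool := c == ' ' || c == '\t' || c == '\n'

-- A's loop once index has caught up with i (or started below it): i is never consulted again
def pvProcRun : List Char → Int → Int → Int → Int × Int × Int
  | [], index, cols, rows => (index, rows, cols)
  | c :: rest, index, cols, rows =>
    if c = ' ' ∨ c = '\t' then pvProcRun rest (index + 1) (cols + 1) rows
    else if c = '\n' then pvProcRun rest (index + 1) 0 (rows + 1)
    else (index, rows, cols)

-- skip phase: while i < index the loop only drops characters
lemma loop_skip (l : List Char) : ∀ (i index cols rows : Int), i ≤ index →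
    CleanupTextLoop l i index cols rows = pvProcRun (l.drop (index - i).toNat) index cols rows := by
  induction l with
  | nil => intro i index cols rows _; simp [CleanupTextLoop, pvProcRun]
  | cons c rest ih =>
    intro i index cols rows h
    by_cases hlt : i < index
    · have hd : (index - i).toNat = (index - (i + 1)).toNat + 1 := by omega
      rw [hd]
      simp only [CleanupTextLoop, if_pos hlt, List.drop_succ_cons]
      exact ih (i + 1) index cols rows (by omega)
    · have hd : (index - i).toNat = 0 := by omega
      rw [hd]
      simp only [CleanupTextLoop, if_neg hlt, List.drop_zero, pvProcRun]
      by_cases hws : c = ' ' ∨ c = '\t'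
      · simp only [if_pos hws]
        rw [ih (i + 1) (index + 1) (cols + 1) rows (by omega)]
        have h0 : (index + 1 - (i + 1)).toNat = 0 := by omega
        rw [h0, List.drop_zero]
      · simp only [if_neg hws]
        by_cases hnl : c = '\n'
        · simp only [if_pos hnl]
          rw [ih (i + 1) (index + 1) 0 (rows + 1) (by omega)]
          have h0 : (index + 1 - (i + 1)).toNat = 0 := by omega
          rw [h0, List.drop_zero]
        · simp only [if_neg hnl]

-- desynchronised phase (a negative start position): i < index never fires, index tracks the run
lemma loop_desync (l : List Char) : ∀ (i index cols rows : Int), index ≤ i →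
    CleanupTextLoop l i index cols rows = pvProcRun l index cols rows := by
  induction l with
  | nil => intro i index cols rows _; simp [CleanupTextLoop, pvProcRun]
  | cons c rest ih =>
    intro i index cols rows h
    have hlt : ¬ i < index := by omega
    simp only [CleanupTextLoop, if_neg hlt, pvProcRun]
    by_cases hws : c = ' ' ∨ c = '\t'
    · simp only [if_pos hws]; exact ih (i + 1) (index + 1) (cols + 1) rows (by omega)
    · simp only [if_neg hws]
      by_cases hnl : c = '\n'
      · simp only [if_pos hnl]; exact ih (i + 1) (index + 1) 0 (rows + 1) (by omega)
      · simp only [if_neg hnl]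

-- str.count with a single-character needle: one unfolding step of the fuelled search
lemma count_go_cons (c : Char) (t : List Char) (f acc : Nat) :
    PySem.Chars.count.go ['\n'] (f + 1) (c :: t) acc =
      (if c = '\n' then PySem.Chars.count.go ['\n'] f t (acc + 1)
       else PySem.Chars.count.go ['\n'] f t acc) := by
  rw [PySem.Chars.count.go.eq_def]
  simp only [List.isPrefixOf, Bool.and_true]
  by_cases hc : c = '\n'
  · simp [hc]
  · simp [hc, Ne.symm hc]

lemma count_go_singleton (l : List Char) : ∀ (fuel acc : Nat), l.length ≤ fuel →
    PySem.Chars.count.go ['\n'] fuel l acc = acc + l.count '\n' := by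
  induction l with
  | nil => intro fuel acc _; cases fuel <;> simp [PySem.Chars.count.go]
  | cons c t ih =>
    intro fuel acc h
    cases fuel with
    | zero => simp at h
    | succ f =>
      rw [count_go_cons, List.count_cons]
      have ht : t.length ≤ f := by simpa using Nat.le_of_succ_le_succ h
      by_cases hc : c = '\n'
      · rw [if_pos hc, ih f (acc + 1) ht]; simp [hc]; omega
      · rw [if_neg hc, ih f acc ht]; simp [hc]

lemma count_singleton (l : List Char) : PySem.Chars.count l ['\n'] = l.count '\n' := by
  simp only [PySem.Chars.count, List.isEmpty_cons, Bool.false_eq_true, if_false]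
  simpa using count_go_singleton l l.length 0 le_rfl

-- str.rfind with a single-character needle: shifting the scan window by one character
lemma rfind_go_shift (t : List Char) (c : Char) : ∀ (j : Nat),
    PySem.Chars.rfind.go (c :: t) ['\n'] (j + 1) =
      if PySem.Chars.rfind.go t ['\n'] j ≠ -1 then PySem.Chars.rfind.go t ['\n'] j + 1
      else if c = '\n' then 0 else -1 := by
  intro j
  induction j with
  | zero =>
    rw [PySem.Chars.rfind.go.eq_def]
    simp only [List.drop_succ_cons, List.drop_zero]
    rw [PySem.Chars.rfind.go.eq_def (c :: t)]
    rw [show PySem.Chars.rfind.go t ['\n'] 0 = if ['\n'].isPrefixOf t then 0 else -1 from by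
      rw [PySem.Chars.rfind.go.eq_def]]
    by_cases hp : ['\n'].isPrefixOf t
    · simp [hp]
    · simp only [hp]
      simp [List.isPrefixOf]
      by_cases hc : c = '\n' <;> simp [hc, Ne.symm]
  | succ j ih =>
    rw [PySem.Chars.rfind.go.eq_def]
    simp only [List.drop_succ_cons]
    rw [show PySem.Chars.rfind.go t ['\n'] (j + 1) =
        if ['\n'].isPrefixOf (t.drop (j + 1)) then ((j : Int) + 1)
        else PySem.Chars.rfind.go t ['\n'] j from by
      rw [PySem.Chars.rfind.go.eq_def]; norm_num]
    by_cases hp : ['\n'].isPrefixOf (t.drop (j + 1))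
    · simp only [hp, if_pos]
      have hne : ((j : Int) + 1) ≠ -1 := by omega
      simp [hne]
    · simp only [hp]
      rw [show ((j : Nat) + 1 + 1 : Nat) = j + 2 from rfl] at *
      exact ih

lemma rfind_cons (c : Char) (t : List Char) :
    PySem.Chars.rfind (c :: t) ['\n'] =
      if PySem.Chars.rfind t ['\n'] ≠ -1 then PySem.Chars.rfind t ['\n'] + 1
      else if c = '\n' then 0 else -1 := by
  rw [PySem.Chars.rfind, PySem.Chars.rfind]
  simpa using rfind_go_shift t c t.length

lemma rfind_nil : PySem.Chars.rfind ([] : List Char) ['\n'] = -1 := by decide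

lemma rfind_ge (l : List Char) : -1 ≤ PySem.Chars.rfind l ['\n'] := by
  induction l with
  | nil => rw [rfind_nil]
  | cons c t ih =>
    rw [rfind_cons]
    by_cases h : PySem.Chars.rfind t ['\n'] ≠ -1
    · rw [if_pos h]; omega
    · rw [if_neg h]
      by_cases hc : c = '\n' <;> simp [hc]

-- run/rows/cols characterisation of A's processing phase, in B's vocabulary
lemma procRun_eq (l : List Char) : ∀ (index cols rows : Int),
    pvProcRun l index cols rows =
      (index + ((l.takeWhile pvWs).length : Int),
       rows + ((l.takeWhile pvWs).count '\n' : Int),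
       if PySem.Chars.rfind (l.takeWhile pvWs) ['\n'] ≠ -1 then
         ((l.takeWhile pvWs).length : Int) - PySem.Chars.rfind (l.takeWhile pvWs) ['\n'] - 1
       else cols + ((l.takeWhile pvWs).length : Int)) := by
  induction l with
  | nil => intro index cols rows; simp [pvProcRun, rfind_nil]
  | cons c t ih =>
    intro index cols rows
    by_cases hsp : c = ' ' ∨ c = '\t'
    · have hws : pvWs c = true := by rcases hsp with h | h <;> simp [pvWs, h]
      have hnl : ¬ c = '\n' := by rcases hsp with h | h <;> simp [h]
      rw [List.takeWhile_cons_of_pos hws]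
      simp only [pvProcRun, if_pos hsp]
      rw [ih (index + 1) (cols + 1) rows]
      rw [rfind_cons, List.count_cons, List.length_cons]
      by_cases hr : PySem.Chars.rfind (t.takeWhile pvWs) ['\n'] ≠ -1
      · have h1 : PySem.Chars.rfind (t.takeWhile pvWs) ['\n'] + 1 ≠ -1 := by
          have := rfind_ge (t.takeWhile pvWs); omega
        rw [if_pos hr, if_pos hr, if_pos h1]
        refine Prod.ext (by push_cast; ring) (Prod.ext (by simp [hnl]) ?_)
        push_cast; ring
      · rw [if_neg hr, if_neg hr]
        have h2 : ¬ ((if c = '\n' then (0 : Int) else -1) ≠ -1) := by simp [hnl]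
        rw [if_neg h2]
        refine Prod.ext (by push_cast; ring) (Prod.ext (by simp [hnl]) ?_)
        push_cast; ring
    · by_cases hnl : c = '\n'
      · have hws : pvWs c = true := by simp [pvWs, hnl]
        rw [List.takeWhile_cons_of_pos hws]
        simp only [pvProcRun, if_neg hsp, if_pos hnl]
        rw [ih (index + 1) 0 (rows + 1)]
        rw [rfind_cons, List.count_cons, List.length_cons]
        by_cases hr : PySem.Chars.rfind (t.takeWhile pvWs) ['\n'] ≠ -1
        · have h1 : PySem.Chars.rfind (t.takeWhile pvWs) ['\n'] + 1 ≠ -1 := by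
            have := rfind_ge (t.takeWhile pvWs); omega
          rw [if_pos hr, if_pos hr, if_pos h1]
          refine Prod.ext (by push_cast; ring) (Prod.ext (by simp [hnl]; ring) ?_)
          push_cast; ring
        · rw [if_neg hr, if_neg hr]
          have h2 : (if c = '\n' then (0 : Int) else -1) ≠ -1 := by simp [hnl]
          rw [if_pos h2, if_pos hnl]
          refine Prod.ext (by push_cast; ring) (Prod.ext (by simp [hnl]; ring) ?_)
          push_cast; ring
      · have hws : pvWs c = false := by
          simp [pvWs]
          exact ⟨⟨fun h => hsp (Or.inl h), fun h => hsp (Or.inr h)⟩, hnl⟩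
        rw [List.takeWhile_cons_of_neg (by simp [hws])]
        simp [pvProcRun, if_neg hsp, if_neg hnl, rfind_nil]

lemma pvLstripRun_eq (l : List Char) : pvLstripRun l = l.dropWhile pvWs := rfl

lemma lstrip_len (l : List Char) :
    (l.length : Int) - ((l.dropWhile pvWs).length : Int) = ((l.takeWhile pvWs).length : Int) := by
  have h := congrArg List.length (List.takeWhile_append_dropWhile (p := pvWs) (l := l))
  rw [List.length_append] at h
  omega

lemma take_takeWhile_len (l : List Char) : l.take (l.takeWhile pvWs).length = l.takeWhile pvWs := by
  calc l.take (l.takeWhile pvWs).length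
      = (l.takeWhile pvWs ++ l.dropWhile pvWs).take (l.takeWhile pvWs).length := by
        rw [List.takeWhile_append_dropWhile]
    _ = l.takeWhile pvWs := List.take_left

-- A's loop from i = 0 equals the processing phase on the suffix from max(0, index)
lemma loop_eq_procRun (cs : List Char) (n0 cols rows : Int) :
    CleanupTextLoop cs 0 n0 cols rows = pvProcRun (cs.drop (max 0 n0).toNat) n0 cols rows := by
  by_cases h : 0 ≤ n0
  · have := loop_skip cs 0 n0 cols rows h
    rw [this, max_eq_right h, Int.sub_zero]
  · rw [loop_desync cs 0 n0 cols rows (by omega)]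
    have h0 : (max 0 n0).toNat = 0 := by omega
    rw [h0, List.drop_zero]

-- ===== VERDICT (by name: the statement is the Claim_ definition above) =====
theorem CleanupText_spec : Claim_equal_CleanupText := by
  unfold Claim_equal_CleanupText
  intro start_index text start_cols start_rows skip _
  unfold Spec_CleanupText CleanupText CleanupText_alt
  simp only []
  have hmax : (0 : Int) ≤ max 0 (start_index + skip) := le_max_left _ _
  have htail : PySem.Chars.slice text.toList (some (max 0 (start_index + skip))) none
      = text.toList.drop (max 0 (start_index + skip)).toNat := by
    rw [PySem.Chars.slice_eq_listSlice, PySem.List.slice_from _ hmax]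
  rw [htail]
  set tail := text.toList.drop (max 0 (start_index + skip)).toNat with htl
  rw [pvLstripRun_eq, lstrip_len]
  have hrun : PySem.Chars.slice tail none (some ((tail.takeWhile pvWs).length : Int))
      = tail.takeWhile pvWs := by
    rw [PySem.Chars.slice_eq_listSlice, PySem.List.slice_to _ (by positivity),
      Int.toNat_natCast, take_takeWhile_len]
  rw [hrun, count_singleton, loop_eq_procRun, procRun_eq]
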